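-- pv_equiv track=rewrite | github.com/remram44/ngram-search | python/ngram_search/__init__.py | string_trigrams
-- ===== SOURCE A (Python) =====
-- END_MARKER = '$'
--
-- def string_trigrams(string: str) -> (int, int, int):
--     if len(string) == 0:
--         yield END_MARKER, END_MARKER, END_MARKER
--     else:
--         end = ord(END_MARKER)
--         c1 = c2 = end
--         for c3 in string:
--             c3 = ord(c3)
--             yield c1, c2, c3
--             c1 = c2
--             c2 = c3
--         yield c1, c2, end
--         yield c2, end, end
-- ===== SOURCE B (Python) =====
-- END_MARKER = '$'
--
-- def string_trigrams(string: str) -> (int, int, int):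
--     if len(string) == 0:
--         yield END_MARKER, END_MARKER, END_MARKER
--         return
--     e = ord(END_MARKER)
--     pad = [e, e] + [ord(c) for c in string] + [e, e]
--     yield from zip(pad, pad[1:], pad[2:])
-- ===== Notes on version B (the rewrite author's own statement) =====
-- stated objective: idiomatic
-- what changed: Instead of hand-maintaining two rolling ord variables and emitting the two trailing marker windows explicitly, B builds the '$$'-padded ord list once and yields every width-3 sliding window via zip(pad, pad[1:], pad[2:]).
-- outside the precondition, e.g. on string_trigrams(''): A returns [('$', '$', '$')], B returns [('$', '$', '$')]
import Mathlib
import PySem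

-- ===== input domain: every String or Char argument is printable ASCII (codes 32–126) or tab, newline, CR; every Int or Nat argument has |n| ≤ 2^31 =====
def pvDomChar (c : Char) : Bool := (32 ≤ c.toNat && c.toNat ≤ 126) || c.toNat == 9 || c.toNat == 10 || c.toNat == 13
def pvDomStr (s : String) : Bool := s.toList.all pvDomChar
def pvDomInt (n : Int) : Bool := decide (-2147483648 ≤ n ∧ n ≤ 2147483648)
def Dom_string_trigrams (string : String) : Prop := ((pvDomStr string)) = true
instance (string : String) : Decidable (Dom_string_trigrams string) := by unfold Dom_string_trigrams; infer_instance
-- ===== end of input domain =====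

-- B replaces the rolling two-variable trigram loop by zipping a '$$'-padded ord list with its
-- own shifts (idiomatic sliding window); same values, same cost.


-- ===== PORT A =====
-- On the empty string the Python yields a tuple of '$' STRINGS, not ints — that input is
-- outside Pre_; the branch is kept with the marker ords only to keep the port total.
def string_trigrams (string : String) : List (Int × Int × Int) :=
  if string.toList.length = 0 then [(36, 36, 36)]
  else
    let endc : Int := 36
    let st := string.toList.foldl
      (fun (p : Int × Int × List (Int × Int × Int)) c =>
        let c3 : Int := (c.toNat : Int)
        (p.2.1, c3, p.2.2 ++ [(p.1, p.2.1, c3)]))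
      (endc, endc, [])
    st.2.2 ++ [(st.1, st.2.1, endc), (st.2.1, endc, endc)]

-- ===== PORT B =====
def string_trigrams_alt (string : String) : List (Int × Int × Int) :=
  if string.toList.length = 0 then [(36, 36, 36)]
  else
    let e : Int := 36
    let pad : List Int := [e, e] ++ string.toList.map (fun c => (c.toNat : Int)) ++ [e, e]
    List.zipWith3 (fun a b c => (a, b, c)) pad (pad.drop 1) (pad.drop 2)

-- ===== PRECONDITION & SPEC =====
-- Pre_ excludes only the empty string, on which A yields one tuple of '$' STRING markers —
-- not a value of the declared (int,int,int) type.
def Pre_string_trigrams (string : String) : Prop := string ≠ ""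
instance (string : String) : Decidable (Pre_string_trigrams string) := by unfold Pre_string_trigrams; infer_instance
def pvWitness_string_trigrams : String := "ab"

def Spec_string_trigrams (string : String) (out : List (Int × Int × Int)) : Prop := out = string_trigrams_alt string
instance (string : String) (out : List (Int × Int × Int)) : Decidable (Spec_string_trigrams string out) := by unfold Spec_string_trigrams; infer_instance

-- ===== CLAIM (what is proved, stated in full; the proofs are below) =====
def Claim_equal_string_trigrams : Prop := ∀ (string : String), Dom_string_trigrams string → Pre_string_trigrams string → Spec_string_trigrams string (string_trigrams string)

-- ===== LEMMAS AND PROOFS =====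

-- A's rolling fold, finished with the two trailing marker windows, is exactly the
-- sliding-window zip of the padded sequence starting from state (a, b).
theorem trigrams_fold_eq (l : List Char) : ∀ (a b : Int) (acc : List (Int × Int × Int)),
    (let st := l.foldl
        (fun (p : Int × Int × List (Int × Int × Int)) c =>
          let c3 : Int := (c.toNat : Int)
          (p.2.1, c3, p.2.2 ++ [(p.1, p.2.1, c3)]))
        (a, b, acc)
     st.2.2 ++ [(st.1, st.2.1, (36 : Int)), (st.2.1, 36, 36)])
    = acc ++ List.zipWith3 (fun x y z => (x, y, z))
        (a :: b :: (l.map (fun c => (c.toNat : Int)) ++ [36, 36]))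
        (b :: (l.map (fun c => (c.toNat : Int)) ++ [36, 36]))
        (l.map (fun c => (c.toNat : Int)) ++ [36, 36]) := by
  induction l with
  | nil => intro a b acc; simp [List.zipWith3]
  | cons c t ih =>
    intro a b acc
    simp only [List.foldl_cons, List.map_cons]
    rw [ih b (c.toNat : Int) (acc ++ [(a, b, (c.toNat : Int))])]
    simp [List.zipWith3]

-- ===== VERDICT (by name: the statement is the Claim_ definition above) =====
theorem string_trigrams_spec : Claim_equal_string_trigrams := by
  intro s _ _
  unfold Spec_string_trigrams string_trigrams string_trigrams_alt
  by_cases h : s.toList.length = 0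
  · simp [h]
  · simp only [h, if_false]
    have := trigrams_fold_eq s.toList 36 36 []
    simp only [List.nil_append] at this
    simpa [List.drop] using this
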